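-- pv_equiv track=rewrite | github.com/mahela37/adventOfCode | 2022/10/solution.py | compute_cycles
-- ===== SOURCE A (Python) =====
-- def compute_cycles(operations: list[str]):
--     cycle_vals = [1]
--     value = 1
--     for entry in operations:
--         operation = entry.split(" ")
--         if operation[0] == "addx":
--             cycle_vals.append(value)
--             value = value + int(operation[1])
--             cycle_vals.append(value)
--         else:
--             cycle_vals.append(value)
--     return cycle_vals
-- ===== SOURCE B (Python) =====
-- def compute_cycles(operations: list[str]):
--     # Two-pass decomposition: build a flat per-cycle delta table, then prefix-sum it.
--     deltas = []
--     for entry in operations: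
--         operation = entry.split(" ")
--         if operation[0] == "addx":
--             deltas += [0, int(operation[1])]
--         else:
--             deltas += [0]
--     out = [1]
--     cur = 1
--     for d in deltas:
--         cur += d
--         out.append(cur)
--     return out
-- ===== Notes on version B (the rewrite author's own statement) =====
-- stated objective: alternative
-- what changed: B replaces A's single interleaved loop (emitting register values while executing) by two differently-shaped passes: first a flat per-cycle delta table (0 for every cycle, plus the addx amount), then a prefix-sum scan producing the cycle values.
import Mathlib
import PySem

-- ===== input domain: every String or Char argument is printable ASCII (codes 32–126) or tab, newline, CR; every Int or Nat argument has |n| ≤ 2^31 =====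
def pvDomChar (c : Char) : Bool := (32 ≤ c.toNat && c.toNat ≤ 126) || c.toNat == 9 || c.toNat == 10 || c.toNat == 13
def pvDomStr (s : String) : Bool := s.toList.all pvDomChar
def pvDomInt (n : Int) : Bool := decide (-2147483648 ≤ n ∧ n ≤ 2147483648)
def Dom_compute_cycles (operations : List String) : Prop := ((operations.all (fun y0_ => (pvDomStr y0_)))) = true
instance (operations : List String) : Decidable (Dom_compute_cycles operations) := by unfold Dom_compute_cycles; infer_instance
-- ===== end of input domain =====

-- B builds a flat per-cycle delta table and prefix-sums it, instead of A's single interleaved emit-while-executing loop; same cost, different decomposition.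


-- ===== PORT A =====
-- one fold carrying (cycle_vals, value); int(operation[1]) is defaulted to 0 where Python would raise — those inputs are outside Pre_
def pvStepA (st : List Int × Int) (entry : String) : List Int × Int :=
  let operation := (PySem.Str.split? entry " ").getD []
  if (PySem.List.pyGet? operation 0).getD "" = "addx" then
    let value := st.2 + ((PySem.List.pyGet? operation 1).bind PySem.Int.ofStr?).getD 0
    ((st.1 ++ [st.2]) ++ [value], value)
  else
    (st.1 ++ [st.2], st.2)

def compute_cycles (operations : List String) : List Int :=
  (operations.foldl pvStepA ([1], 1)).1

-- ===== PORT B =====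
-- the per-entry delta chunk: [0, d] for addx d, [0] otherwise (same defaulting outside Pre_)
def pvChunk (entry : String) : List Int :=
  let operation := (PySem.Str.split? entry " ").getD []
  if (PySem.List.pyGet? operation 0).getD "" = "addx" then
    [0, ((PySem.List.pyGet? operation 1).bind PySem.Int.ofStr?).getD 0]
  else
    [0]

def compute_cycles_alt (operations : List String) : List Int :=
  let deltas := operations.foldl (fun acc entry => acc ++ pvChunk entry) []
  (deltas.foldl (fun (st : List Int × Int) d => (st.1 ++ [st.2 + d], st.2 + d)) ([1], 1)).1

-- ===== PRECONDITION & SPEC =====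
-- Pre_ excludes exactly the inputs on which Python A raises (an 'addx' entry whose second
-- space-separated token is missing or not int()-parseable: IndexError / ValueError).
def Pre_compute_cycles (operations : List String) : Prop :=
  (operations.all (fun entry =>
    let operation := (PySem.Str.split? entry " ").getD []
    ((PySem.List.pyGet? operation 0).getD "" != "addx") ||
      ((PySem.List.pyGet? operation 1).bind PySem.Int.ofStr?).isSome)) = true
instance (operations : List String) : Decidable (Pre_compute_cycles operations) := by
  unfold Pre_compute_cycles; infer_instance
def pvWitness_compute_cycles : List String := ["addx 3", "noop", "addx -5"]

def Spec_compute_cycles (operations : List String) (out : List Int) : Prop := out = compute_cycles_alt operations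
instance (operations : List String) (out : List Int) : Decidable (Spec_compute_cycles operations out) := by unfold Spec_compute_cycles; infer_instance

-- ===== CLAIM (what is proved, stated in full; the proofs are below) =====
def Claim_equal_compute_cycles : Prop := ∀ (operations : List String), Dom_compute_cycles operations → Pre_compute_cycles operations → Spec_compute_cycles operations (compute_cycles operations)

-- ===== LEMMAS AND PROOFS =====

-- B's scan step
def pvScanStep (st : List Int × Int) (d : Int) : List Int × Int := (st.1 ++ [st.2 + d], st.2 + d)

-- scanning one chunk of entry e from state st does exactly what A's step does
lemma scan_chunk (entry : String) (st : List Int × Int) :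
    (pvChunk entry).foldl pvScanStep st = pvStepA st entry := by
  unfold pvChunk pvStepA
  by_cases h : (PySem.List.pyGet? ((PySem.Str.split? entry " ").getD []) 0).getD "" = "addx" <;>
    simp [h, pvScanStep, List.foldl]

-- A's fold over the operations equals B's scan over the concatenated chunks, from any start state
lemma fold_eq_scan (operations : List String) : ∀ (st : List Int × Int),
    operations.foldl pvStepA st = (operations.flatMap pvChunk).foldl pvScanStep st := by
  induction operations with
  | nil => intro st; simp
  | cons e rest ih =>
      intro st
      rw [List.foldl_cons, List.flatMap_cons, List.foldl_append, scan_chunk, ih]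

-- ===== VERDICT (by name: the statement is the Claim_ definition above) =====
theorem compute_cycles_spec : Claim_equal_compute_cycles := by
  intro operations _ _
  unfold Spec_compute_cycles compute_cycles compute_cycles_alt
  rw [PySem.List.foldl_append_eq_flatMap, fold_eq_scan]
  rfl
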